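-- pv_equiv track=rewrite | github.com/Justin-143/Portfolio | python.py | time_to_reach_top
-- ===== SOURCE A (Python) =====
-- def time_to_reach_top(x,y,z):
--     h=0
--     m=0
--     while(h<x):
--         m +=1
--         if m%2 ==1:
--             h +=y
--         else:
--             h -=z
--     return m
-- ===== SOURCE B (Python) =====
-- def time_to_reach_top(x, y, z):
--     # O(1) closed form: minute 2k+1 leaves height y + k*(y-z), minute 2k leaves k*(y-z);
--     # take the earlier of the first crossing of each arithmetic subsequence.
--     if x <= 0:
--         return 0
--     if y >= x:
--         return 1
--     d = y - z
--     k1 = -((y - x) // d)   # ceil((x - y) / d): first odd minute is 2*k1 + 1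
--     k2 = -((-x) // d)      # ceil(x / d): first even minute is 2*k2
--     return min(2 * k1 + 1, 2 * k2)
-- ===== Notes on version B (the rewrite author's own statement) =====
-- stated objective: alternative
-- what changed: Replaced the minute-by-minute simulation loop by a closed form: heights after odd/even minutes form two arithmetic progressions with step y-z, so the answer is the minimum of the first crossing of each, computed with two ceiling divisions instead of a loop.
import Mathlib
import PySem

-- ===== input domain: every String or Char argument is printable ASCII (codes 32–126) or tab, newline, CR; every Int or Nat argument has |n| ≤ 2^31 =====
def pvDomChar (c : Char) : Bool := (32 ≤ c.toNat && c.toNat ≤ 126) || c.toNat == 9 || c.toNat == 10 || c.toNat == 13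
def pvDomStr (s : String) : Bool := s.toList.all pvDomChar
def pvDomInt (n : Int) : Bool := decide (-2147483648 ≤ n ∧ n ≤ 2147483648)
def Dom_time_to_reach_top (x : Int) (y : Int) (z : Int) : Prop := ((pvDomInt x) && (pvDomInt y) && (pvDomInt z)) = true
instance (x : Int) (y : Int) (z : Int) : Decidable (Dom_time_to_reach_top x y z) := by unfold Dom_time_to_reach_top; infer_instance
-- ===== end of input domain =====

-- B computes A's answer by a closed form (two ceiling divisions) instead of simulating the climb minute by minute.

-- ===== PORT A =====
-- literal port of A's while-loop; the fuel only makes it total: inside Pre_ the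
-- loop is proved to halt within the fuel, outside Pre_ the Python loop diverges
def pvLoopA (x y z : Int) : Nat → Int → Int → Int
  | 0, _, m => m
  | fuel + 1, h, m =>
    if h < x then
      let m' := m + 1
      if PySem.Int.mod m' 2 = 1 then pvLoopA x y z fuel (h + y) m'
      else pvLoopA x y z fuel (h - z) m'
    else m

def time_to_reach_top (x : Int) (y : Int) (z : Int) : Int :=
  pvLoopA x y z (2 * (x.toNat + (x - y).toNat) + 4) 0 0

-- ===== PORT B =====
def time_to_reach_top_alt (x : Int) (y : Int) (z : Int) : Int :=
  if x ≤ 0 then 0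
  else if y ≥ x then 1
  else
    let d := y - z
    let k1 := -(PySem.Int.floordiv (y - x) d)
    let k2 := -(PySem.Int.floordiv (-x) d)
    min (2 * k1 + 1) (2 * k2)

-- ===== PRECONDITION & SPEC =====
-- Pre_ excludes exactly the inputs on which A's while-loop never terminates
-- (x > 0 and y < x and y - z ≤ 0: the height can never reach x).
def Pre_time_to_reach_top (x : Int) (y : Int) (z : Int) : Prop := x ≤ 0 ∨ x ≤ y ∨ z < y
instance (x : Int) (y : Int) (z : Int) : Decidable (Pre_time_to_reach_top x y z) := by unfold Pre_time_to_reach_top; infer_instance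
def pvWitness_time_to_reach_top : Int × Int × Int := (10, 3, 1)

def Spec_time_to_reach_top (x : Int) (y : Int) (z : Int) (out : Int) : Prop := out = time_to_reach_top_alt x y z
instance (x : Int) (y : Int) (z : Int) (out : Int) : Decidable (Spec_time_to_reach_top x y z out) := by unfold Spec_time_to_reach_top; infer_instance

-- ===== CLAIM (what is proved, stated in full; the proofs are below) =====
def Claim_equal_time_to_reach_top : Prop := ∀ (x : Int) (y : Int) (z : Int), Dom_time_to_reach_top x y z → Pre_time_to_reach_top x y z → Spec_time_to_reach_top x y z (time_to_reach_top x y z)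

-- ===== LEMMAS AND PROOFS =====

lemma pvLoopA_done (x y z h m : Int) (fuel : Nat) (hge : ¬ h < x) :
    pvLoopA x y z fuel h m = m := by
  cases fuel <;> simp only [pvLoopA, if_neg hge]

lemma pvLoopA_step (x y z h m : Int) (fuel : Nat) :
    pvLoopA x y z (fuel + 1) h m =
      if h < x then
        (if PySem.Int.mod (m + 1) 2 = 1 then pvLoopA x y z fuel (h + y) (m + 1)
         else pvLoopA x y z fuel (h - z) (m + 1))
      else m := rfl

-- loop invariant: before minute 2k+1 the height is k*(y-z); the loop's answer is
-- the minimum of the first crossing of the odd and the even arithmetic progressions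
lemma pvLoopA_spec (x y z d k1 k2 : Int) (hdz : d = y - z) (hd : 0 < d)
    (hk1 : (k1 - 1) * d < x - y ∧ x - y ≤ k1 * d)
    (hk2 : (k2 - 1) * d < x ∧ x ≤ k2 * d) :
    ∀ (fuel : Nat) (k : Nat), (k : Int) * d < x → (k : Int) ≤ k1 →
      min (2 * k1 + 1) (2 * k2) - 2 * (k : Int) + 1 ≤ (fuel : Int) →
      pvLoopA x y z fuel ((k : Int) * d) (2 * (k : Int)) = min (2 * k1 + 1) (2 * k2) := by
  intro fuel
  induction fuel using Nat.strong_induction_on with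
  | _ fuel ih =>
    intro k hkx hkk1 hfuel
    have hkk2 : (k : Int) < k2 := by
      have : (k : Int) * d < k2 * d := lt_of_lt_of_le hkx hk2.2
      exact lt_of_mul_lt_mul_right this (le_of_lt hd)
    have hmin_lb : 2 * (k : Int) + 1 ≤ min (2 * k1 + 1) (2 * k2) := by omega
    obtain ⟨f, rfl⟩ : ∃ f, fuel = f + 2 := by
      refine ⟨fuel - 2, ?_⟩; omega
    have hmod1 : PySem.Int.mod (2 * (k : Int) + 1) 2 = 1 := by
      rw [PySem.Int.mod_eq_emod_of_pos (by omega)]; omega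
    show pvLoopA x y z (f + 2) ((k : Int) * d) (2 * (k : Int)) = _
    rw [show f + 2 = (f + 1) + 1 from rfl, pvLoopA_step, if_pos hkx, if_pos hmod1]
    by_cases hA : x ≤ (k : Int) * d + y
    · -- odd minute 2k+1 reaches the top
      rw [pvLoopA_done _ _ _ _ _ _ (by omega)]
      have hk1le : k1 ≤ (k : Int) := by
        have : (k1 - 1) * d < (k : Int) * d := lt_of_lt_of_le hk1.1 (by omega)
        have := lt_of_mul_lt_mul_right this (le_of_lt hd)
        omega
      omega
    · -- slip at minute 2k+2: height becomes (k+1)*(y-z)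
      push_neg at hA
      have hkk1' : (k : Int) < k1 := by
        have : (k : Int) * d < k1 * d := lt_of_lt_of_le (by omega) hk1.2
        exact lt_of_mul_lt_mul_right this (le_of_lt hd)
      have hmod0 : ¬ PySem.Int.mod (2 * (k : Int) + 1 + 1) 2 = 1 := by
        rw [PySem.Int.mod_eq_emod_of_pos (by omega)]; omega
      rw [pvLoopA_step, if_pos hA, if_neg hmod0]
      have hstate : (k : Int) * d + y - z = ((k : Int) + 1) * d := by rw [hdz]; ring
      by_cases hB : x ≤ ((k : Int) + 1) * d
      · -- even minute 2k+2 reaches the top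
        rw [hstate, pvLoopA_done _ _ _ _ _ _ (by omega)]
        have hk2le : k2 ≤ (k : Int) + 1 := by
          have : (k2 - 1) * d < ((k : Int) + 1) * d := lt_of_lt_of_le hk2.1 hB
          have := lt_of_mul_lt_mul_right this (le_of_lt hd)
          omega
        omega
      · push_neg at hB
        have := ih f (by omega) (k + 1) (by push_cast; omega)
          (by push_cast; omega) (by push_cast; omega)
        push_cast at this
        rw [hstate, show (2 * (k : Int) + 1 + 1) = 2 * ((k : Int) + 1) by ring]
        exact this

-- ===== VERDICT (by name: the statement is the Claim_ definition above) =====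
theorem time_to_reach_top_spec : Claim_equal_time_to_reach_top := by
  intro x y z _hdom hpre
  show time_to_reach_top x y z = time_to_reach_top_alt x y z
  unfold time_to_reach_top time_to_reach_top_alt
  by_cases hx : x ≤ 0
  · rw [pvLoopA_done _ _ _ _ _ _ (by omega), if_pos hx]
  · push_neg at hx
    by_cases hyx : y ≥ x
    · -- one minute suffices
      rw [show 2 * (x.toNat + (x - y).toNat) + 4 = (2 * (x.toNat + (x - y).toNat) + 3) + 1 from rfl,
        pvLoopA_step, if_pos (show (0:Int) < x by omega),
        if_pos (show PySem.Int.mod ((0:Int) + 1) 2 = 1 by decide),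
        pvLoopA_done _ _ _ _ _ _ (by omega), if_neg (by omega), if_pos hyx]
      norm_num
    · push_neg at hyx
      have hzy : z < y := by rcases hpre with h | h | h <;> omega
      set d : Int := y - z with hdz
      have hd : 0 < d := by omega
      set k1 : Int := -(PySem.Int.floordiv (y - x) d) with hk1def
      set k2 : Int := -(PySem.Int.floordiv (-x) d) with hk2def
      have hk1 : (k1 - 1) * d < x - y ∧ x - y ≤ k1 * d := by
        have := (PySem.Int.neg_floordiv_neg_eq_iff_of_pos (a := x - y) (b := d) (q := k1) hd).mp
        apply this
        rw [hk1def, show -(x - y) = y - x by ring]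
      have hk2 : (k2 - 1) * d < x ∧ x ≤ k2 * d := by
        have := (PySem.Int.neg_floordiv_neg_eq_iff_of_pos (a := x) (b := d) (q := k2) hd).mp
        apply this
        rw [hk2def]
      have hk1pos : 1 ≤ k1 := by
        by_contra h
        have hk1d : k1 * d ≤ 0 := mul_nonpos_of_nonpos_of_nonneg (by omega) (le_of_lt hd)
        omega
      have hk1ub : k1 ≤ x - y := by
        have h1 : (k1 - 1) ≤ (k1 - 1) * d := le_mul_of_one_le_right (by omega) (by omega)
        omega
      have hfuel : min (2 * k1 + 1) (2 * k2) - 2 * ((0:Nat) : Int) + 1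
          ≤ ((2 * (x.toNat + (x - y).toNat) + 4 : Nat) : Int) := by
        push_cast
        have h1 : (x.toNat : Int) = x := by omega
        have h2 : ((x - y).toNat : Int) = x - y := by omega
        rw [h1, h2]
        omega
      have := pvLoopA_spec x y z d k1 k2 hdz hd hk1 hk2
        (2 * (x.toNat + (x - y).toNat) + 4) 0 (by simpa using hx) (by push_cast; omega) hfuel
      simp only [Nat.cast_zero, zero_mul, mul_zero] at this
      rw [this, if_neg (by omega), if_neg (by omega)]
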